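-- pv_equiv track=rewrite | github.com/imchenmin/AnimalBehaviorDesktop | backend/wash_recognition.py | getEach
-- ===== SOURCE A (Python) =====
-- def getEach(data, fps):
--
--     res = []
--     for i in range(len(data) - 1):
--         if data[i] == 0 and data[i + 1] != 0:
--             if len(res) == 0:
--                 res.append(i + 2)
--             elif i + 2 - res[-1] > fps * 5:
--                 res.append(i + 2)
--     return res
-- ===== SOURCE B (Python) =====
-- def getEach(data, fps):
--     # Skip-ahead scan: after accepting a transition at index i, jump the scan
--     # index forward past the whole exclusion window instead of remembering the
--     # last accepted value and re-testing every later candidate against it.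
--     res = []
--     n = len(data) - 1
--     step = 5 * fps + 1
--     if step < 1:
--         step = 1
--     i = 0
--     while i < n:
--         if data[i] == 0 and data[i + 1] != 0:
--             res.append(i + 2)
--             i += step
--         else:
--             i += 1
--     return res
-- ===== Notes on version B (the rewrite author's own statement) =====
-- stated objective: alternative
-- what changed: B drops A's res[-1] look-back entirely: a skip-ahead while loop jumps the scan index forward by max(1, 5*fps+1) after each accepted transition, so the exclusion window is never re-tested candidate by candidate; correct because A's rejected candidates never update res[-1], making the whole window skippable.
import Mathlib
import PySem

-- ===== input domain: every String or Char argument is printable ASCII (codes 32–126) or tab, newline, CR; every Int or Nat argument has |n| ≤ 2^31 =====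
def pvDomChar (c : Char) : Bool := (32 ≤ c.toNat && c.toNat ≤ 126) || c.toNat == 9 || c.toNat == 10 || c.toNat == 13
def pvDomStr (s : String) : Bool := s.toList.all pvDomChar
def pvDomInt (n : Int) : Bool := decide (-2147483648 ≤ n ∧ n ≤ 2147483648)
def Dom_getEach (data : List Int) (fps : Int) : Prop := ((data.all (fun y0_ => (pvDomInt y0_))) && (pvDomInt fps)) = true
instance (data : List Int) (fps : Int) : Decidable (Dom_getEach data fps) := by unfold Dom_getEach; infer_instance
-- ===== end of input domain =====

-- B replaces A's look-back at res[-1] by a skip-ahead scan that jumps past the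
-- whole exclusion window after each accepted transition; objective: alternative.

-- ===== PORT A =====
def getEach (data : List Int) (fps : Int) : List Int :=
  (PySem.List.pyRange 0 (data.length - 1) 1).foldl (fun res i =>
    if (PySem.List.pyGet? data i).getD 0 = 0 ∧ (PySem.List.pyGet? data (i + 1)).getD 0 ≠ 0 then
      if res.length = 0 then res ++ [i + 2]
      else if i + 2 - (PySem.List.pyGet? res (-1)).getD 0 > fps * 5 then res ++ [i + 2]
      else res
    else res) []

-- ===== PORT B =====
-- the while loop of Source B; `hs` only witnesses termination (step ≥ 1, as Source B guarantees)
def getEachAltLoop (data : List Int) (n step : Int) (hs : 1 ≤ step) (i : Int) (res : List Int) : List Int :=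
  if h : i < n then
    if (PySem.List.pyGet? data i).getD 0 = 0 ∧ (PySem.List.pyGet? data (i + 1)).getD 0 ≠ 0 then
      getEachAltLoop data n step hs (i + step) (res ++ [i + 2])
    else
      getEachAltLoop data n step hs (i + 1) res
  else res
termination_by (n - i).toNat
decreasing_by all_goals omega

def getEach_alt (data : List Int) (fps : Int) : List Int :=
  let n : Int := data.length - 1
  let step : Int := if 5 * fps + 1 < 1 then 1 else 5 * fps + 1
  getEachAltLoop data n step (by dsimp only [step]; split <;> omega) 0 []

-- ===== PRECONDITION & SPEC =====
def Spec_getEach (data : List Int) (fps : Int) (out : List Int) : Prop := out = getEach_alt data fps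
instance (data : List Int) (fps : Int) (out : List Int) : Decidable (Spec_getEach data fps out) := by unfold Spec_getEach; infer_instance

-- ===== CLAIM (what is proved, stated in full; the proofs are below) =====
def Claim_equal_getEach : Prop := ∀ (data : List Int) (fps : Int), Dom_getEach data fps → Spec_getEach data fps (getEach data fps)

-- ===== LEMMAS AND PROOFS =====

-- abstract reference recursion: state is only the last accepted value (or none)
def specRun (data : List Int) (n fps : Int) (i : Int) (last : Option Int) : List Int :=
  if i < n then
    if (PySem.List.pyGet? data i).getD 0 = 0 ∧ (PySem.List.pyGet? data (i + 1)).getD 0 ≠ 0 then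
      if (match last with | none => true | some v => decide (i + 2 - v > fps * 5)) = true then
        (i + 2) :: specRun data n fps (i + 1) (some (i + 2))
      else specRun data n fps (i + 1) last
    else specRun data n fps (i + 1) last
  else []
termination_by (n - i).toNat
decreasing_by all_goals omega

theorem pyGet_last (xs : List Int) (a : Int) :
    (PySem.List.pyGet? (xs ++ [a]) (-1)).getD 0 = a := by
  simp [PySem.List.pyGet?, PySem.List.pyIdx?]

theorem lemA (data : List Int) (n fps : Int) (i : Int) (res : List Int) (last : Option Int)
    (hrel : match last with
            | none => res = []
            | some v => res ≠ [] ∧ (PySem.List.pyGet? res (-1)).getD 0 = v) :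
    (PySem.List.pyRange i n 1).foldl (fun res i =>
      if (PySem.List.pyGet? data i).getD 0 = 0 ∧ (PySem.List.pyGet? data (i + 1)).getD 0 ≠ 0 then
        if res.length = 0 then res ++ [i + 2]
        else if i + 2 - (PySem.List.pyGet? res (-1)).getD 0 > fps * 5 then res ++ [i + 2]
        else res
      else res) res = res ++ specRun data n fps i last := by
  generalize hk : (n - i).toNat = k
  induction k generalizing i res last with
  | zero =>
    rw [PySem.List.pyRange_one_eq_nil (by omega), specRun.eq_def, if_neg (by omega)]
    simp
  | succ k ih =>
    by_cases h : i < n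
    · rw [PySem.List.pyRange_one_cons h, List.foldl_cons, specRun.eq_def, if_pos h]
      by_cases ht : (PySem.List.pyGet? data i).getD 0 = 0 ∧ (PySem.List.pyGet? data (i + 1)).getD 0 ≠ 0
      · simp only [if_pos ht]
        match last with
        | none =>
          have hres : res = [] := hrel
          subst hres
          simp only [List.length_nil, List.nil_append, if_true]
          rw [ih (i + 1) [i + 2] (some (i + 2))
              ⟨by simp, by simpa using pyGet_last [] (i + 2)⟩ (by omega)]
          simp
        | some v =>
          obtain ⟨hne, hlastv⟩ := hrel
          rw [if_neg (by simpa using List.length_eq_zero_iff.not.mpr hne), hlastv]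
          by_cases hc : i + 2 - v > fps * 5
          · have hd : (decide (i + 2 - v > fps * 5)) = true := by simpa using hc
            rw [if_pos hc]
            simp only [hd, if_true]
            rw [ih (i + 1) (res ++ [i + 2]) (some (i + 2))
                ⟨by simp, pyGet_last res (i + 2)⟩ (by omega)]
            simp
          · have hd : (decide (i + 2 - v > fps * 5)) = false := by simpa using hc
            rw [if_neg hc]
            simp only [hd, Bool.false_eq_true, if_false]
            exact ih (i + 1) res (some v) ⟨hne, hlastv⟩ (by omega)
      · rw [if_neg ht, if_neg ht]
        exact ih (i + 1) res last hrel (by omega)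
    · rw [PySem.List.pyRange_one_eq_nil (by omega), specRun.eq_def, if_neg h]
      simp

theorem skipRun (data : List Int) (n fps p step : Int)
    (hstep : step = if 5 * fps + 1 < 1 then 1 else 5 * fps + 1)
    (j : Int) (hj1 : p + 1 ≤ j) (hj2 : j ≤ p + step) :
    specRun data n fps j (some (p + 2)) = specRun data n fps (p + step) (some (p + 2)) := by
  generalize hk : (p + step - j).toNat = k
  induction k generalizing j with
  | zero =>
    have : j = p + step := by omega
    rw [this]
  | succ k ih =>
    have hjlt : j < p + step := by omega
    have hbound : j - p ≤ fps * 5 := by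
      by_cases hb : 5 * fps + 1 < 1 <;> simp [hb] at hstep <;> omega
    by_cases h : j < n
    · rw [specRun.eq_def, if_pos h]
      by_cases ht : (PySem.List.pyGet? data j).getD 0 = 0 ∧ (PySem.List.pyGet? data (j + 1)).getD 0 ≠ 0
      · have hd : (decide (j + 2 - (p + 2) > fps * 5)) = false := by simp; omega
        rw [if_pos ht]
        simp only [hd, Bool.false_eq_true, if_false]
        exact ih (j + 1) (by omega) (by omega) (by omega)
      · rw [if_neg ht]
        exact ih (j + 1) (by omega) (by omega) (by omega)
    · rw [specRun.eq_def, if_neg h, specRun.eq_def, if_neg (by omega)]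

theorem forgetRun (data : List Int) (n fps p : Int) (j : Int)
    (hj : p + fps * 5 + 1 ≤ j) :
    specRun data n fps j (some (p + 2)) = specRun data n fps j none := by
  generalize hk : (n - j).toNat = k
  induction k generalizing j with
  | zero =>
    rw [specRun.eq_def, if_neg (by omega)]
    rw [specRun.eq_def, if_neg (by omega)]
  | succ k ih =>
    by_cases h : j < n
    · rw [specRun.eq_def, if_pos h]
      conv_rhs => rw [specRun.eq_def]
      rw [if_pos h]
      by_cases ht : (PySem.List.pyGet? data j).getD 0 = 0 ∧ (PySem.List.pyGet? data (j + 1)).getD 0 ≠ 0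
      · have hd : (decide (j + 2 - (p + 2) > fps * 5)) = true := by simp; omega
        rw [if_pos ht, if_pos ht]
        simp only [hd, if_true]
      · rw [if_neg ht, if_neg ht]
        exact ih (j + 1) (by omega) (by omega)
    · rw [specRun.eq_def, if_neg h]
      rw [specRun.eq_def, if_neg h]

theorem lemB (data : List Int) (n step fps : Int) (hs : 1 ≤ step)
    (hstep : step = if 5 * fps + 1 < 1 then 1 else 5 * fps + 1)
    (i : Int) (res : List Int) :
    getEachAltLoop data n step hs i res = res ++ specRun data n fps i none := by
  have H : ∀ (k : Nat) (i : Int) (res : List Int), (n - i).toNat ≤ k →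
      getEachAltLoop data n step hs i res = res ++ specRun data n fps i none := by
    intro k
    induction k with
    | zero =>
      intro i res hk
      rw [getEachAltLoop.eq_def, dif_neg (by omega), specRun.eq_def, if_neg (by omega)]
      simp
    | succ k ih =>
      intro i res hk
      by_cases h : i < n
      · rw [getEachAltLoop.eq_def, dif_pos h, specRun.eq_def, if_pos h]
        by_cases ht : (PySem.List.pyGet? data i).getD 0 = 0 ∧ (PySem.List.pyGet? data (i + 1)).getD 0 ≠ 0
        · rw [if_pos ht, if_pos ht, if_pos rfl]
          rw [ih (i + step) (res ++ [i + 2]) (by omega)]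
          have hfar : i + fps * 5 + 1 ≤ i + step := by
            by_cases hb : 5 * fps + 1 < 1 <;> simp [hb] at hstep <;> omega
          rw [← forgetRun data n fps i (i + step) hfar,
              ← skipRun data n fps i step hstep (i + 1) (by omega) (by omega)]
          simp
        · rw [if_neg ht, if_neg ht]
          exact ih (i + 1) res (by omega)
      · rw [getEachAltLoop.eq_def, dif_neg h, specRun.eq_def, if_neg h]
        simp
  exact H (n - i).toNat i res le_rfl

-- ===== VERDICT (by name: the statement is the Claim_ definition above) =====
theorem getEach_spec : Claim_equal_getEach := by
  intro data fps _
  unfold Spec_getEach getEach getEach_alt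
  rw [lemB data _ _ fps _ rfl 0 []]
  simpa using lemA data (data.length - 1) fps 0 [] none rfl
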